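-- pv_equiv track=rewrite | github.com/yhtwng/mathtools | td14.py | croche
-- ===== SOURCE A (Python) =====
-- from math import factorial
--
-- def croche(n):
--     facteurs_premiers = [] #facteurs premiers
--     for i in range(2,n):
--         if n % i == 0:
--             facteurs_premiers.append(i)
--
--     mult_facteurs_premiers = [] #multiples des facteurs premiers
--     for i in range(0,len(facteurs_premiers)):
--         fact_prem = facteurs_premiers[i]
--         for j in range(1,(n//fact_prem)):
--             if fact_prem*j not in mult_facteurs_premiers:
--                 mult_facteurs_premiers.append(fact_prem*j)
--         fact_prem = facteurs_premiers[i]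
--     mult_facteurs_premiers.append(n)
--
--     denom = 1
--     for i in range(len(mult_facteurs_premiers)):
--         denom *= mult_facteurs_premiers[i]
--
--     num = factorial(n)
--
--     return num//denom
-- ===== SOURCE B (Python) =====
-- from math import factorial, gcd
--
-- def croche(n):
--     # product of the non-coprime numbers in [2, n) times n, in one gcd pass
--     denom = n
--     for k in range(2, n):
--         if gcd(k, n) > 1:
--             denom *= k
--     return factorial(n) // denom
-- ===== Notes on version B (the rewrite author's own statement) =====
-- stated objective: faster
-- what changed: Replaces A's two-stage construction (collect proper divisors of n, then mark and dedup all their in-range multiples with quadratic 'not in' scans) with a single flat pass multiplying every k in [2,n) with gcd(k,n)>1 into the denominator; intended as faster (a timing run read several times faster at the largest sizes but recorded the label unconfirmed).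
import Mathlib
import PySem

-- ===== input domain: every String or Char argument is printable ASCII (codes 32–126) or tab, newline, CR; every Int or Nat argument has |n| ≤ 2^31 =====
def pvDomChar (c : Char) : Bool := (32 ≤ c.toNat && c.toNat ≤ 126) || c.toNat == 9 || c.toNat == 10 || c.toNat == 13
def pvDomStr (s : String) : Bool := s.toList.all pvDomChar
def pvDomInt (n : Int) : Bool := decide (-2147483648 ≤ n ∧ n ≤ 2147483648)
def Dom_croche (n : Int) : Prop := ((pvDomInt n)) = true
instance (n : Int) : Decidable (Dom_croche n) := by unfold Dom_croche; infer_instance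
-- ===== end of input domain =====

-- B replaces A's divisor-list + mark-multiples-with-dedup construction by one flat
-- gcd filter pass; intended as faster (quadratic membership scans removed; a timing run read it several times faster at large n but recorded the label unconfirmed).

-- math.factorial(n), n ≥ 0 under Pre_
def pyFactorial (n : Int) : Int := (Nat.factorial n.toNat : Int)

-- ===== PORT A =====
-- facteurs_premiers (proper divisors of n)
def crocheFps (n : Int) : List Int :=
  (PySem.List.pyRange 2 n 1).foldl
    (fun acc i => if PySem.Int.mod n i = 0 then acc ++ [i] else acc) []

-- mult_facteurs_premiers before the final append(n); index loop over facteurs_premiers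
-- (fact_prem = facteurs_premiers[i]: index always in range, so pyGetD with default 0 is exact)
def crocheMults (n : Int) (fps : List Int) : List Int :=
  (PySem.List.pyRange 0 (fps.length : Int) 1).foldl
    (fun acc i =>
      (PySem.List.pyRange 1 (PySem.Int.floordiv n (PySem.List.pyGetD fps i 0)) 1).foldl
        (fun acc2 j =>
          if (PySem.List.pyGetD fps i 0) * j ∈ acc2 then acc2
          else acc2 ++ [(PySem.List.pyGetD fps i 0) * j]) acc) []

-- denom = 1; for i in range(len(xs)): denom *= xs[i]
def crocheDenom (xs : List Int) : Int :=
  (PySem.List.pyRange 0 (xs.length : Int) 1).foldl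
    (fun d i => d * PySem.List.pyGetD xs i 0) 1

def croche (n : Int) : Int :=
  PySem.Int.floordiv (pyFactorial n) (crocheDenom (crocheMults n (crocheFps n) ++ [n]))

-- ===== PORT B =====
def croche_alt (n : Int) : Int :=
  PySem.Int.floordiv (pyFactorial n)
    ((PySem.List.pyRange 2 n 1).foldl
      (fun acc k => if 1 < Int.gcd k n then acc * k else acc) n)

-- ===== PRECONDITION & SPEC =====
-- A raises for n ≤ 0 (ValueError from factorial for n < 0, ZeroDivisionError for n = 0)
def Pre_croche (n : Int) : Prop := 1 ≤ n
instance (n : Int) : Decidable (Pre_croche n) := by unfold Pre_croche; infer_instance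
def pvWitness_croche : Int := 6
def Spec_croche (n : Int) (out : Int) : Prop := out = croche_alt n
instance (n : Int) (out : Int) : Decidable (Spec_croche n out) := by unfold Spec_croche; infer_instance

-- ===== CLAIM (what is proved, stated in full; the proofs are below) =====
def Claim_equal_croche : Prop := ∀ (n : Int), Dom_croche n → Pre_croche n → Spec_croche n (croche n)

-- ===== LEMMAS AND PROOFS =====

-- membership/nodup of the dedup-insert inner loop
theorem dedupFold_mem (f : Int → Int) (L : List Int) (acc : List Int) (m : Int) :
    m ∈ L.foldl (fun a j => if f j ∈ a then a else a ++ [f j]) acc ↔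
      m ∈ acc ∨ ∃ j ∈ L, f j = m := by
  induction L generalizing acc with
  | nil => simp
  | cons x t ih =>
    simp only [List.foldl_cons]
    by_cases h : f x ∈ acc
    · rw [if_pos h, ih]
      constructor
      · rintro (hm | ⟨j, hj, he⟩)
        · exact Or.inl hm
        · exact Or.inr ⟨j, List.mem_cons_of_mem _ hj, he⟩
      · rintro (hm | ⟨j, hj, he⟩)
        · exact Or.inl hm
        · rcases List.mem_cons.mp hj with rfl | hj
          · exact Or.inl (he ▸ h)
          · exact Or.inr ⟨j, hj, he⟩
    · rw [if_neg h, ih]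
      simp only [List.mem_append, List.mem_cons, List.not_mem_nil, or_false]
      constructor
      · rintro ((hm | hm) | ⟨j, hj, he⟩)
        · exact Or.inl hm
        · exact Or.inr ⟨x, Or.inl rfl, hm.symm⟩
        · exact Or.inr ⟨j, Or.inr hj, he⟩
      · rintro (hm | ⟨j, rfl | hj, he⟩)
        · exact Or.inl (Or.inl hm)
        · exact Or.inl (Or.inr he.symm)
        · exact Or.inr ⟨j, hj, he⟩

theorem dedupFold_nodup (f : Int → Int) (L : List Int) (acc : List Int) (h : acc.Nodup) :
    (L.foldl (fun a j => if f j ∈ a then a else a ++ [f j]) acc).Nodup := by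
  induction L generalizing acc with
  | nil => exact h
  | cons x t ih =>
    simp only [List.foldl_cons]
    by_cases hx : f x ∈ acc
    · rw [if_pos hx]; exact ih acc h
    · rw [if_neg hx]
      exact ih _ (h.append (List.nodup_singleton _)
        (by simpa [List.disjoint_singleton] using hx))

-- the append-if loop is a filter (membership form)
theorem appendIfFold_mem (P : Int → Prop) [DecidablePred P] (L : List Int) (acc : List Int) (m : Int) :
    m ∈ L.foldl (fun a i => if P i then a ++ [i] else a) acc ↔ m ∈ acc ∨ (m ∈ L ∧ P m) := by
  induction L generalizing acc with
  | nil => simp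
  | cons x t ih =>
    simp only [List.foldl_cons]
    by_cases h : P x
    · rw [if_pos h, ih]
      simp only [List.mem_append, List.mem_cons, List.not_mem_nil, or_false]
      constructor
      · rintro ((hm | hm) | ⟨hm, hp⟩)
        · exact Or.inl hm
        · exact Or.inr ⟨Or.inl hm, hm ▸ h⟩
        · exact Or.inr ⟨Or.inr hm, hp⟩
      · rintro (hm | ⟨rfl | hm, hp⟩)
        · exact Or.inl (Or.inl hm)
        · exact Or.inl (Or.inr rfl)
        · exact Or.inr ⟨hm, hp⟩
    · rw [if_neg h, ih]
      simp only [List.mem_cons]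
      constructor
      · rintro (hm | ⟨hm, hp⟩)
        · exact Or.inl hm
        · exact Or.inr ⟨Or.inr hm, hp⟩
      · rintro (hm | ⟨rfl | hm, hp⟩)
        · exact Or.inl hm
        · exact absurd hp h
        · exact Or.inr ⟨hm, hp⟩

-- outer mark-multiples loop, fold over the divisor list itself
theorem multsFold_mem (n : Int) (fps : List Int) (acc : List Int) (m : Int) :
    m ∈ fps.foldl (fun acc fp =>
        (PySem.List.pyRange 1 (PySem.Int.floordiv n fp) 1).foldl
          (fun a2 j => if fp * j ∈ a2 then a2 else a2 ++ [fp * j]) acc) acc ↔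
      m ∈ acc ∨ ∃ fp ∈ fps, ∃ j, (1 ≤ j ∧ j < PySem.Int.floordiv n fp) ∧ fp * j = m := by
  induction fps generalizing acc with
  | nil => simp
  | cons x t ih =>
    simp only [List.foldl_cons]
    rw [ih, dedupFold_mem]
    simp only [PySem.List.mem_pyRange_one, List.mem_cons]
    constructor
    · rintro ((hm | ⟨j, hj, he⟩) | ⟨fp, hfp, j, hj, he⟩)
      · exact Or.inl hm
      · exact Or.inr ⟨x, Or.inl rfl, j, hj, he⟩
      · exact Or.inr ⟨fp, Or.inr hfp, j, hj, he⟩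
    · rintro (hm | ⟨fp, rfl | hfp, j, hj, he⟩)
      · exact Or.inl (Or.inl hm)
      · exact Or.inl (Or.inr ⟨j, hj, he⟩)
      · exact Or.inr ⟨fp, hfp, j, hj, he⟩

theorem multsFold_nodup (n : Int) (fps : List Int) (acc : List Int) (h : acc.Nodup) :
    (fps.foldl (fun acc fp =>
        (PySem.List.pyRange 1 (PySem.Int.floordiv n fp) 1).foldl
          (fun a2 j => if fp * j ∈ a2 then a2 else a2 ++ [fp * j]) acc) acc).Nodup := by
  induction fps generalizing acc with
  | nil => exact h
  | cons x t ih => exact ih _ (dedupFold_nodup _ _ _ h)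

-- the multiply-if loop of B is init times the product of the filtered list
theorem mulIfFold (P : Int → Prop) [DecidablePred P] (L : List Int) (init : Int) :
    L.foldl (fun acc k => if P k then acc * k else acc) init
      = init * (L.filter (fun k => decide (P k))).prod := by
  induction L generalizing init with
  | nil => simp
  | cons x t ih =>
    simp only [List.foldl_cons]
    by_cases h : P x
    · rw [if_pos h, ih, List.filter_cons_of_pos (by simpa using h), List.prod_cons]
      ring
    · rw [if_neg h, ih, List.filter_cons_of_neg (by simpa using h)]

-- core arithmetic fact: m is an in-range multiple of a proper divisor of n
-- iff 2 ≤ m < n and gcd(m,n) > 1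
theorem key_iff (n m : Int) (hn : 1 ≤ n) :
    (∃ fp, ((2 ≤ fp ∧ fp < n) ∧ fp ∣ n) ∧
        ∃ j, (1 ≤ j ∧ j < PySem.Int.floordiv n fp) ∧ fp * j = m) ↔
      ((2 ≤ m ∧ m < n) ∧ 1 < Int.gcd m n) := by
  constructor
  · rintro ⟨fp, ⟨⟨hfp2, hfpn⟩, hdvd⟩, j, ⟨hj1, hjlt⟩, rfl⟩
    have hfp0 : (0:Int) < fp := by omega
    rw [PySem.Int.floordiv_eq_ediv_of_pos hfp0] at hjlt
    have hq : fp * (n / fp) + n % fp = n := Int.mul_ediv_add_emod n fp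
    have hr : 0 ≤ n % fp := Int.emod_nonneg n (by omega)
    have hmul : fp * j ≤ fp * (n / fp - 1) :=
      mul_le_mul_of_nonneg_left (by omega) (by omega)
    have hlt : fp * j < n := by nlinarith
    have hge : 2 ≤ fp * j := by nlinarith
    refine ⟨⟨hge, hlt⟩, ?_⟩
    have hc : ((fp.toNat : Int)) = fp := Int.toNat_of_nonneg (by omega)
    have hdg : fp.toNat ∣ Int.gcd (fp * j) n :=
      Int.dvd_gcd (by rw [hc]; exact ⟨j, rfl⟩) (by rw [hc]; exact hdvd)
    have hgpos : 0 < Int.gcd (fp * j) n := Int.gcd_pos_iff.mpr (Or.inr (by omega))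
    have := Nat.le_of_dvd hgpos hdg
    omega
  · rintro ⟨⟨hm2, hmn⟩, hg⟩
    have h1 : (Int.gcd m n : Int) ∣ m := Int.gcd_dvd_left m n
    have h2 : (Int.gcd m n : Int) ∣ n := Int.gcd_dvd_right m n
    have hgm : (Int.gcd m n : Int) ≤ m := Int.le_of_dvd (by omega) h1
    have he1 : (Int.gcd m n : Int) * (m / (Int.gcd m n : Int)) = m := Int.mul_ediv_cancel' h1
    have he2 : (Int.gcd m n : Int) * (n / (Int.gcd m n : Int)) = n := Int.mul_ediv_cancel' h2
    refine ⟨(Int.gcd m n : Int), ⟨⟨by omega, by omega⟩, h2⟩,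
      m / (Int.gcd m n : Int), ⟨?_, ?_⟩, he1⟩
    · by_contra hcon
      rw [Int.not_le] at hcon
      nlinarith
    · rw [PySem.Int.floordiv_eq_ediv_of_pos (by omega)]
      have : (Int.gcd m n : Int) * (m / (Int.gcd m n : Int)) <
          (Int.gcd m n : Int) * (n / (Int.gcd m n : Int)) := by omega
      exact lt_of_mul_lt_mul_left this (by omega)

-- A's index loops over a list with pyGetD are folds over the list itself
theorem crocheMults_eq (n : Int) (fps : List Int) :
    crocheMults n fps = fps.foldl (fun acc fp =>
        (PySem.List.pyRange 1 (PySem.Int.floordiv n fp) 1).foldl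
          (fun a2 j => if fp * j ∈ a2 then a2 else a2 ++ [fp * j]) acc) [] := by
  unfold crocheMults
  exact PySem.List.foldl_pyRange_zero_pyGetD' fps 0
    (fun acc fp =>
      (PySem.List.pyRange 1 (PySem.Int.floordiv n fp) 1).foldl
        (fun a2 j => if fp * j ∈ a2 then a2 else a2 ++ [fp * j]) acc) []

theorem crocheDenom_eq (xs : List Int) : crocheDenom xs = xs.prod := by
  unfold crocheDenom
  rw [PySem.List.foldl_pyRange_zero_pyGetD' xs 0 (· * ·) 1]
  exact (List.prod_eq_foldl).symm

-- ===== VERDICT (by name: the statement is the Claim_ definition above) =====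
theorem croche_spec : Claim_equal_croche := by
  intro n _ hn
  unfold Spec_croche croche croche_alt
  rw [crocheDenom_eq, crocheMults_eq, mulIfFold (fun k => 1 < Int.gcd k n)]
  have hperm : (crocheFps n).foldl (fun acc fp =>
      (PySem.List.pyRange 1 (PySem.Int.floordiv n fp) 1).foldl
        (fun a2 j => if fp * j ∈ a2 then a2 else a2 ++ [fp * j]) acc) [] |>.Perm
      ((PySem.List.pyRange 2 n 1).filter (fun k => decide (1 < Int.gcd k n))) := by
    rw [List.perm_ext_iff_of_nodup (multsFold_nodup n _ [] List.nodup_nil)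
        ((PySem.List.nodup_pyRange_one 2 n).filter _)]
    intro m
    rw [multsFold_mem, List.mem_filter]
    simp only [List.not_mem_nil, false_or, PySem.List.mem_pyRange_one, decide_eq_true_eq]
    rw [← key_iff n m hn]
    unfold crocheFps
    constructor
    · rintro ⟨fp, hfp, hj⟩
      rw [appendIfFold_mem (fun i => PySem.Int.mod n i = 0)] at hfp
      simp only [List.not_mem_nil, false_or, PySem.List.mem_pyRange_one,
        PySem.Int.mod_eq_zero_iff_dvd] at hfp
      exact ⟨fp, ⟨⟨hfp.1.1, hfp.1.2⟩, hfp.2⟩, hj⟩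
    · rintro ⟨fp, ⟨⟨h2, hlt⟩, hdvd⟩, hj⟩
      refine ⟨fp, ?_, hj⟩
      rw [appendIfFold_mem (fun i => PySem.Int.mod n i = 0)]
      simp only [List.not_mem_nil, false_or, PySem.List.mem_pyRange_one,
        PySem.Int.mod_eq_zero_iff_dvd]
      exact ⟨⟨h2, hlt⟩, hdvd⟩
  rw [List.prod_append, hperm.prod_eq]
  simp [mul_comm]
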